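-- pv_equiv track=rewrite | github.com/Legena/HackBulgaria | week0/day1.py | nan_expand
-- ===== SOURCE A (Python) =====
-- def nan_expand(times):
--     number = ""
--     if (times == 0):
--         return number
--     number = "NaN"
--     for step in range(0, times):
--         number = "Not a " + number
--     return number
-- ===== SOURCE B (Python) =====
-- def nan_expand(times):
--     if times == 0:
--         return ""
--     return "Not a " * times + "NaN"
-- ===== Notes on version B (the rewrite author's own statement) =====
-- stated objective: faster
-- what changed: Replaces the repeated-concatenation loop with the closed-form string repetition "Not a " * times + "NaN".
import Mathlib
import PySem

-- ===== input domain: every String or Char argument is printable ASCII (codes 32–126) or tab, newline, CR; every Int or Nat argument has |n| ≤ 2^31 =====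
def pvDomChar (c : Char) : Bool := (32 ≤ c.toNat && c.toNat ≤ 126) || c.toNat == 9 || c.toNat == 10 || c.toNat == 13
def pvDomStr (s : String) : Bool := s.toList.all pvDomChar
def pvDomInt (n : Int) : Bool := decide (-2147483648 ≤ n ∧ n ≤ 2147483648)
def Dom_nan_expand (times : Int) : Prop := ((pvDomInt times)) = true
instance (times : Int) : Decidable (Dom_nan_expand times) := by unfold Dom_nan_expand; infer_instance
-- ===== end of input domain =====

-- ===== PORT A =====
-- B replaces A's repeated-concatenation loop with the closed-form "Not a " * times + "NaN" (simpler).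
def nan_expand (times : Int) : String :=
  let number := ""
  if times == 0 then number
  else
    let number := "NaN"
    (PySem.List.pyRange 0 times 1).foldl (fun acc _ => "Not a " ++ acc) number

-- ===== PORT B =====
-- "Not a " * times  (Python string repetition; negative counts give "")
def pyStrMul (s : String) (n : Int) : String :=
  String.join (List.replicate n.toNat s)

def nan_expand_alt (times : Int) : String :=
  if times == 0 then "" else pyStrMul "Not a " times ++ "NaN"

-- ===== PRECONDITION & SPEC =====
def Spec_nan_expand (times : Int) (out : String) : Prop := out = nan_expand_alt times
instance (times : Int) (out : String) : Decidable (Spec_nan_expand times out) := by unfold Spec_nan_expand; infer_instance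

-- ===== CLAIM (what is proved, stated in full; the proofs are below) =====
def Claim_equal_nan_expand : Prop := ∀ (times : Int), Dom_nan_expand times → Spec_nan_expand times (nan_expand times)

-- ===== LEMMAS AND PROOFS =====
theorem foldl_nota (l : List Int) (acc : String) :
    l.foldl (fun a _ => "Not a " ++ a) acc = String.join (List.replicate l.length "Not a ") ++ acc := by
  induction l generalizing acc with
  | nil => simp [String.join]
  | cons x xs ih =>
      simp only [List.foldl_cons, ih, List.length_cons, List.replicate_succ']
      simp [String.join, String.append_assoc]

-- ===== VERDICT (by name: the statement is the Claim_ definition above) =====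
theorem nan_expand_spec : Claim_equal_nan_expand := by
  intro times _
  unfold Spec_nan_expand nan_expand nan_expand_alt pyStrMul
  by_cases h : times = 0
  · simp [h]
  · simp only [beq_iff_eq, h, if_false]
    rw [PySem.List.pyRange_one, foldl_nota]
    simp
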